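-- pv_equiv track=rewrite | github.com/hassanali-ocloud/learning_ecommerce | tasks/task_4/sum_digit.py | is_it_single
-- ===== SOURCE A (Python) =====
-- def is_it_single(num: int):
--     counter = 0
--     while num > 0:
--         num = num // 10
--         counter += 1
--     if counter > 1:
--         return False
--     else:
--         return True
-- ===== SOURCE B (Python) =====
-- def is_it_single(num: int):
--     # closed form: the digit-count loop yields counter <= 1 exactly when num < 10
--     return num < 10
-- ===== Notes on version B (the rewrite author's own statement) =====
-- stated objective: simpler
-- what changed: Replaces the digit-counting while-loop with a single closed-form comparison of the input against ten, preserving A's behaviour on negatives and zero.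
import Mathlib
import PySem

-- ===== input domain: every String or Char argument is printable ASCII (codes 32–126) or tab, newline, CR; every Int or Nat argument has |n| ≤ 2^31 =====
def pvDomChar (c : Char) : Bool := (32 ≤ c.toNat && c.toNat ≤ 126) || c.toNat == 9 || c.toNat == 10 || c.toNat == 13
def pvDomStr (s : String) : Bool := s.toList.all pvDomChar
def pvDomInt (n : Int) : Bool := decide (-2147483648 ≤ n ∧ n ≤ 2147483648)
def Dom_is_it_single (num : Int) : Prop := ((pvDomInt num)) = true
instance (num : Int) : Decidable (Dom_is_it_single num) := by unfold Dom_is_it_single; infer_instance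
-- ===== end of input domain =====

-- B replaces A's digit-counting loop with the closed-form comparison num < 10 (simpler).

-- ===== PORT A =====
-- the while loop of A: state (num, counter), step num = num // 10, counter += 1
def isItSingleLoop (num : Int) (counter : Int) : Int :=
  if h : num > 0 then
    isItSingleLoop (PySem.Int.floordiv num 10) (counter + 1)
  else
    counter
termination_by num.toNat
decreasing_by
  have h10 : (0:Int) < 10 := by norm_num
  rw [PySem.Int.floordiv_eq_ediv_of_pos h10]
  omega

def is_it_single (num : Int) : Bool :=
  let counter := isItSingleLoop num 0
  if counter > 1 then false else true

-- ===== PORT B =====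
def is_it_single_alt (num : Int) : Bool := num < 10

-- ===== PRECONDITION & SPEC =====
def Spec_is_it_single (num : Int) (out : Bool) : Prop := out = is_it_single_alt num
instance (num : Int) (out : Bool) : Decidable (Spec_is_it_single num out) := by unfold Spec_is_it_single; infer_instance

-- ===== CLAIM (what is proved, stated in full; the proofs are below) =====
def Claim_equal_is_it_single : Prop := ∀ (num : Int), Dom_is_it_single num → Spec_is_it_single num (is_it_single num)

-- ===== LEMMAS AND PROOFS =====

-- the loop's counter never decreases below its start value
theorem isItSingleLoop_ge (num counter : Int) : counter ≤ isItSingleLoop num counter := by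
  induction num, counter using isItSingleLoop.induct with
  | case1 num counter h ih =>
      rw [isItSingleLoop, dif_pos h]
      omega
  | case2 num counter h =>
      rw [isItSingleLoop, dif_neg h]

theorem isItSingleLoop_char (num : Int) : (isItSingleLoop num 0 > 1) = (10 ≤ num) := by
  by_cases h : num > 0
  · rw [isItSingleLoop, dif_pos h]
    by_cases h10 : 10 ≤ num
    · -- num ≥ 10: quotient q ≥ 1, loop from (q,1) steps again to counter ≥ 2
      have hq : 1 ≤ PySem.Int.floordiv num 10 := by
        rw [PySem.Int.floordiv_eq_ediv_of_pos (by norm_num)]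
        omega
      rw [isItSingleLoop, dif_pos (by omega)]
      have := isItSingleLoop_ge (PySem.Int.floordiv (PySem.Int.floordiv num 10) 10) (0 + 1 + 1)
      simp only [eq_iff_iff]
      constructor <;> intro <;> omega
    · -- 1 ≤ num ≤ 9: quotient is 0, loop stops with counter = 1
      have hq : PySem.Int.floordiv num 10 = 0 := by
        rw [PySem.Int.floordiv_eq_ediv_of_pos (by norm_num)]
        omega
      rw [hq, isItSingleLoop, dif_neg (by norm_num)]
      simp only [eq_iff_iff]
      omega
  · -- num ≤ 0: loop never runs, counter = 0
    rw [isItSingleLoop, dif_neg h]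
    simp only [eq_iff_iff]
    omega

-- ===== VERDICT (by name: the statement is the Claim_ definition above) =====
theorem is_it_single_spec : Claim_equal_is_it_single := by
  intro num _
  unfold Spec_is_it_single is_it_single is_it_single_alt
  have h := isItSingleLoop_char num
  by_cases h10 : 10 ≤ num
  · simp [h, h10, show ¬ num < 10 by omega]
  · simp [h, h10, show num < 10 by omega]
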